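-- pv_equiv track=rewrite | github.com/mas-the-spaz/BLFS-automation | bootstrap.py | FTP_URL_filter
-- ===== SOURCE A (Python) =====
-- def FTP_URL_filter(URL_list):  # removes ftp links from url list, but only if they are duplicates
--     newlist = []
--     i = 0
--     while i < len(URL_list):
--         if 'texlive' in URL_list[i]:  # the texlive package only contains ftp urls
--             return URL_list
--         if (i % 2) == 0:
--             newlist.append(URL_list[i])
--         elif not 'ftp://' in URL_list[i]:
--             newlist.append(URL_list[i])
--         i += 1
--     return newlist
-- ===== SOURCE B (Python) =====
-- def FTP_URL_filter(URL_list):  # removes ftp links from url list, but only if they are duplicates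
--     if any('texlive' in u for u in URL_list):  # texlive packages only contain ftp urls: keep list untouched
--         return URL_list
--     return [u for i, u in enumerate(URL_list) if i % 2 == 0 or 'ftp://' not in u]
-- ===== Notes on version B (the rewrite author's own statement) =====
-- stated objective: simpler
-- what changed: Replaces the fused indexed while-loop (which interleaves the texlive early-return with appending) by a two-pass decomposition: an any() guard for the texlive abort, then a single comprehension over enumerate that builds the filtered list.
import Mathlib
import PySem

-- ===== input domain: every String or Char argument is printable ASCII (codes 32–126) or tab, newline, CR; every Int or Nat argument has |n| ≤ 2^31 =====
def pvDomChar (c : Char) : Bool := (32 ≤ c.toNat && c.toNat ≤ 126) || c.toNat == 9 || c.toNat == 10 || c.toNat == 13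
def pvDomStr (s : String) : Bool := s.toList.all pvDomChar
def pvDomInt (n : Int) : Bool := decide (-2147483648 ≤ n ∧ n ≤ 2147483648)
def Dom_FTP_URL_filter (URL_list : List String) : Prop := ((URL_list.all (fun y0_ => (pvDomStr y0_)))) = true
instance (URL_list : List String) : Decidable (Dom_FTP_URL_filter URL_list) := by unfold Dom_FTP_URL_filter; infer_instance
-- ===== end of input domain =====

-- B replaces A's fused indexed while-loop by a two-pass decomposition: an any-guard
-- for the texlive abort, then one comprehension over enumerate (objective: simpler).

-- ===== PORT A =====
-- the while loop of A: state (newlist, i), early return of URL_list on texlive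
def FTP_URL_filter_loop (URL_list : List String) (newlist : List String) (i : Nat) :
    List String :=
  if h : i < URL_list.length then
    if PySem.Str.isIn "texlive" URL_list[i] then URL_list
    else if i % 2 == 0 then
      FTP_URL_filter_loop URL_list (newlist ++ [URL_list[i]]) (i + 1)
    else if !(PySem.Str.isIn "ftp://" URL_list[i]) then
      FTP_URL_filter_loop URL_list (newlist ++ [URL_list[i]]) (i + 1)
    else
      FTP_URL_filter_loop URL_list newlist (i + 1)
  else newlist
termination_by URL_list.length - i

def FTP_URL_filter (URL_list : List String) : List String :=
  FTP_URL_filter_loop URL_list [] 0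

-- ===== PORT B =====
def FTP_URL_filter_alt (URL_list : List String) : List String :=
  if URL_list.any (fun u => PySem.Str.isIn "texlive" u) then URL_list
  else (PySem.List.enumerate URL_list).filterMap
    (fun p => if p.1 % 2 == 0 || !(PySem.Str.isIn "ftp://" p.2) then some p.2 else none)

-- ===== PRECONDITION & SPEC =====
def Spec_FTP_URL_filter (URL_list : List String) (out : List String) : Prop := out = FTP_URL_filter_alt URL_list
instance (URL_list : List String) (out : List String) : Decidable (Spec_FTP_URL_filter URL_list out) := by unfold Spec_FTP_URL_filter; infer_instance

-- ===== CLAIM (what is proved, stated in full; the proofs are below) =====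
def Claim_equal_FTP_URL_filter : Prop := ∀ (URL_list : List String), Dom_FTP_URL_filter URL_list → Spec_FTP_URL_filter URL_list (FTP_URL_filter URL_list)

-- ===== LEMMAS AND PROOFS =====

-- the filter used by B's comprehension
def pvKeep (p : Int × String) : Option String :=
  if p.1 % 2 == 0 || !(PySem.Str.isIn "ftp://" p.2) then some p.2 else none

-- if some element at index ≥ i contains "texlive", the loop early-returns URL_list
lemma loop_texlive (URL_list : List String) :
    ∀ (newlist : List String) (i j : Nat), i ≤ j → (h : j < URL_list.length) →
    PySem.Str.isIn "texlive" URL_list[j] = true →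
    FTP_URL_filter_loop URL_list newlist i = URL_list := by
  intro newlist i j hij hj htex
  induction hn : URL_list.length - i generalizing newlist i with
  | zero => omega
  | succ n ih =>
    have hi : i < URL_list.length := by omega
    rw [FTP_URL_filter_loop, dif_pos hi]
    by_cases hti : PySem.Str.isIn "texlive" URL_list[i] = true
    · rw [if_pos hti]
    · have hij' : i + 1 ≤ j := by
        rcases Nat.lt_or_ge i j with h | h
        · omega
        · exfalso; have : i = j := by omega
          subst this; exact hti htex
      rw [if_neg hti]
      split
      · exact ih _ (i + 1) hij' (by omega)
      · split
        · exact ih _ (i + 1) hij' (by omega)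
        · exact ih _ (i + 1) hij' (by omega)

-- if no element at index ≥ i contains "texlive", the loop is newlist ++ the filterMap
-- of enumerate of the tail starting at index i
lemma loop_filter (URL_list : List String) :
    ∀ (newlist : List String) (i : Nat),
    (∀ j : Nat, i ≤ j → (h : j < URL_list.length) →
        PySem.Str.isIn "texlive" URL_list[j] = false) →
    FTP_URL_filter_loop URL_list newlist i =
      newlist ++ (PySem.List.enumerate (URL_list.drop i) i).filterMap pvKeep := by
  intro newlist i htex
  induction hn : URL_list.length - i generalizing newlist i with
  | zero =>
    have : URL_list.length ≤ i := by omega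
    rw [FTP_URL_filter_loop]
    simp [Nat.not_lt.mpr this, List.drop_eq_nil_of_le this]
  | succ n ih =>
    have hi : i < URL_list.length := by omega
    have hdrop : URL_list.drop i = URL_list[i] :: URL_list.drop (i + 1) :=
      List.drop_eq_getElem_cons hi
    have henum : PySem.List.enumerate (URL_list.drop i) (i : Int) =
        ((i : Int), URL_list[i]) :: PySem.List.enumerate (URL_list.drop (i + 1)) ((i : Int) + 1) := by
      rw [hdrop, PySem.List.enumerate_cons]
    have htex' : ∀ j : Nat, i + 1 ≤ j → (h : j < URL_list.length) →
        PySem.Str.isIn "texlive" URL_list[j] = false := by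
      intro j hj h; exact htex j (by omega) h
    have hrec : ∀ nl, FTP_URL_filter_loop URL_list nl (i + 1) =
        nl ++ (PySem.List.enumerate (URL_list.drop (i + 1)) (i + 1 : Nat)).filterMap pvKeep :=
      fun nl => ih nl (i + 1) htex' (by omega)
    have hmod : ((i : Int) % 2 == 0) = ((i % 2 : Nat) == 0) := by
      rcases Nat.even_or_odd i with ⟨k, hk⟩ | ⟨k, hk⟩ <;> subst hk <;> simp <;> omega
    have hcast : ((i + 1 : Nat) : Int) = (i : Int) + 1 := by push_cast; ring
    have hti : ¬ PySem.Str.isIn "texlive" URL_list[i] = true := by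
      simpa using htex i le_rfl hi
    rw [FTP_URL_filter_loop, dif_pos hi, if_neg hti, henum, List.filterMap_cons]
    by_cases him : i % 2 = 0
    · have hcond : ((i : Nat) % 2 == 0) = true := by simp [him]
      have hk : pvKeep ((i : Int), URL_list[i]) = some URL_list[i] := by
        simp [pvKeep, hmod, hcond]
      rw [if_pos hcond, hrec, hcast, hk]
      simp
    · have hcond : ((i : Nat) % 2 == 0) = false := by simp [him]
      rw [if_neg (by simp [hcond])]
      by_cases hftp : PySem.Str.isIn "ftp://" URL_list[i] = true
      · have hftpC : PySem.Chars.isIn ['f', 't', 'p', ':', '/', '/'] URL_list[i].toList = true := by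
          simpa using hftp
        have hk : pvKeep ((i : Int), URL_list[i]) = none := by
          simp [pvKeep, hmod, hcond, hftpC]
        rw [if_neg (by simp [hftpC]), hrec, hcast, hk]
      · have hftp' : PySem.Str.isIn "ftp://" URL_list[i] = false := by simpa using hftp
        have hftpC : PySem.Chars.isIn ['f', 't', 'p', ':', '/', '/'] URL_list[i].toList = false := by
          simpa using hftp'
        have hk : pvKeep ((i : Int), URL_list[i]) = some URL_list[i] := by
          simp [pvKeep, hmod, hcond, hftpC]
        rw [if_pos (by simp [hftpC]), hrec, hcast, hk]
        simp

-- ===== VERDICT (by name: the statement is the Claim_ definition above) =====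
theorem FTP_URL_filter_spec : Claim_equal_FTP_URL_filter := by
  intro URL_list _
  unfold Spec_FTP_URL_filter FTP_URL_filter FTP_URL_filter_alt
  by_cases hany : URL_list.any (fun u => PySem.Str.isIn "texlive" u) = true
  · simp only [hany, if_pos]
    rcases List.any_eq_true.mp hany with ⟨u, hu, htex⟩
    rcases List.getElem_of_mem hu with ⟨j, hj, rfl⟩
    exact loop_texlive URL_list [] 0 j (Nat.zero_le j) hj htex
  · simp only [hany, Bool.false_eq_true, if_false]
    have htex : ∀ j : Nat, 0 ≤ j → (h : j < URL_list.length) →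
        PySem.Str.isIn "texlive" URL_list[j] = false := by
      intro j _ h
      by_contra hc
      exact hany (List.any_eq_true.mpr ⟨URL_list[j], List.getElem_mem h, by simpa using hc⟩)
    have := loop_filter URL_list [] 0 htex
    simpa [pvKeep] using this
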